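-- pv_equiv track=rewrite | github.com/Aasthaengg/IBMdataset | Python_codes/p03230/s938269525.py | f
-- ===== SOURCE A (Python) =====
-- def f(limit):
--     i = 1
--     j = 2
--     while True:
--         if i > limit:
--             break
--         yield i
--         i += j
--         j += 1
-- ===== SOURCE B (Python) =====
-- def f(limit):
--     k = 1
--     while True:
--         t = k * (k + 1) // 2
--         if t > limit:
--             break
--         yield t
--         k += 1
-- ===== Notes on version B (the rewrite author's own statement) =====
-- stated objective: simpler
-- what changed: Replaces the two-variable running-sum accumulator with a single counter whose triangular value is computed in closed form each iteration.
import Mathlib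
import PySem

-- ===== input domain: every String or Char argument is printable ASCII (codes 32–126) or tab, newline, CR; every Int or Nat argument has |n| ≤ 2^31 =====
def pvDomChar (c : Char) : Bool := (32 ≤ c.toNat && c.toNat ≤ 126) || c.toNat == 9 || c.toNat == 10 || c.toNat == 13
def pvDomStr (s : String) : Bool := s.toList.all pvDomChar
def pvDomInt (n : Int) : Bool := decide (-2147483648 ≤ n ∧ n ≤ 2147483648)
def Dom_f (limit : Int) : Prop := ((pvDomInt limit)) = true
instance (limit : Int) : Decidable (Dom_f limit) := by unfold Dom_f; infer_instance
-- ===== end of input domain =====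

-- B replaces A's running-sum pair (i, j) by a single counter k with the closed-form
-- triangular value k*(k+1)//2; return value only (A/B are Python generators, read as lists).

-- ===== PORT A =====
-- A's loop state: i (value), j (step).  Python's j starts at 2 and only grows, so the
-- port encodes j as m + 2 (m : Nat) to make termination visible; values are identical.
def fLoopA (limit i : Int) (m : Nat) : List Int :=
  if i > limit then []
  else i :: fLoopA limit (i + ((m : Int) + 2)) (m + 1)
termination_by (limit + 1 - i).toNat
decreasing_by omega

def f (limit : Int) : List Int := fLoopA limit 1 0

-- ===== PORT B =====
-- n + 1 ≤ (n+1)*(n+2)/2, used only for the loop's termination measure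
theorem triB_ge (n : Nat) : n + 1 ≤ (n + 1) * (n + 2) / 2 := by
  rw [Nat.le_div_iff_mul_le (by norm_num)]
  nlinarith

-- B's loop state: the counter k, encoded as n + 1 (Python's k starts at 1);
-- t = k*(k+1)//2 is Python floor division on positives = Nat division.
def fLoopB (limit : Int) (n : Nat) : List Int :=
  let t : Nat := (n + 1) * (n + 2) / 2
  if (t : Int) > limit then []
  else (t : Int) :: fLoopB limit (n + 1)
termination_by (limit - (n : Int)).toNat
decreasing_by
  have := triB_ge n
  simp only [not_lt] at *
  omega

def f_alt (limit : Int) : List Int := fLoopB limit 0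

-- ===== PRECONDITION & SPEC =====
def Spec_f (limit : Int) (out : List Int) : Prop := out = f_alt limit
instance (limit : Int) (out : List Int) : Decidable (Spec_f limit out) := by unfold Spec_f; infer_instance

-- ===== CLAIM (what is proved, stated in full; the proofs are below) =====
def Claim_equal_f : Prop := ∀ (limit : Int), Dom_f limit → Spec_f limit (f limit)

-- ===== LEMMAS AND PROOFS =====


-- triangular-number step: T(n+1) + (n+2) = T(n+2)
theorem tri_step (n : Nat) : (n + 1) * (n + 2) / 2 + (n + 2) = (n + 2) * (n + 3) / 2 := by
  have h1 : 2 ∣ (n + 1) * (n + 2) := Nat.even_mul_succ_self (n + 1) |>.two_dvd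
  have h2 : 2 ∣ (n + 2) * (n + 3) := Nat.even_mul_succ_self (n + 2) |>.two_dvd
  obtain ⟨a, ha⟩ := h1
  obtain ⟨b, hb⟩ := h2
  have hab : 2 * b = 2 * a + 2 * (n + 2) := by nlinarith
  omega

-- loop invariant: A's state after n iterations is i = T(n+1) with step j = n + 2
theorem loop_eq (limit : Int) (n : Nat) :
    fLoopA limit (((n + 1) * (n + 2) / 2 : Nat) : Int) n = fLoopB limit n := by
  fun_induction fLoopB limit n with
  | case1 n t ht =>
    rw [fLoopA]
    simp_all [t]
  | case2 n t ht ih =>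
    rw [fLoopA]
    simp only [t] at ht ⊢
    rw [if_neg (by omega)]
    have : (((n + 1) * (n + 2) / 2 : Nat) : Int) + ((n : Int) + 2)
         = (((n + 2) * (n + 3) / 2 : Nat) : Int) := by
      rw [← tri_step n, Nat.cast_add]
      push_cast
      ring
    rw [this]
    exact congrArg _ ih

-- ===== VERDICT (by name: the statement is the Claim_ definition above) =====
theorem f_spec : Claim_equal_f := by
  intro limit _
  unfold Spec_f f f_alt
  exact loop_eq limit 0
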